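-- pv_equiv track=rewrite | github.com/alexanderbrownemail-create/mcp-gateway | src/mcp_gateway/modules/memory/module.py | _find_excerpt
-- ===== SOURCE A (Python) =====
-- def _find_excerpt(text: str, keywords: set[str], context: int = 200) -> str:
--     """Находит первое вхождение ключевого слова и возвращает контекст вокруг него."""
--     text_lower = text.lower()
--     best_pos = len(text)
--
--     for kw in keywords:
--         pos = text_lower.find(kw)
--         if 0 <= pos < best_pos:
--             best_pos = pos
--
--     if best_pos == len(text):
--         return text[:context].replace("\n", " ").strip()
--
--     start = max(0, best_pos - context // 2)
--     end = min(len(text), best_pos + context // 2)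
--     excerpt = text[start:end].replace("\n", " ").strip()
--
--     if start > 0:
--         excerpt = "…" + excerpt
--     if end < len(text):
--         excerpt = excerpt + "…"
--
--     return excerpt
-- ===== SOURCE B (Python) =====
-- def _clean(s):
--     return s.replace("\n", " ").strip()
--
--
-- def _find_excerpt(text, keywords, context=200):
--     """Single left-to-right scan: first position where any keyword starts."""
--     text_lower = text.lower()
--     n = len(text)
--     best = next((i for i in range(n)
--                  if any(text_lower.startswith(kw, i) for kw in keywords)), n)
--     if best == n:
--         return _clean(text[:context])
--     half = context // 2
--     start = max(0, best - half)
--     end = min(n, best + half)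
--     mid = _clean(text[start:end])
--     return ("…" if start > 0 else "") + mid + ("…" if end < n else "")
-- ===== Notes on version B (the rewrite author's own statement) =====
-- stated objective: alternative
-- what changed: A takes the minimum over per-keyword first-occurrence searches, each scanning the whole text (text_lower.find(kw) per keyword); B makes one left-to-right scan over positions that stops at the first position where any keyword starts (early exit), then builds the excerpt from conditional ellipsis pieces via a shared _clean helper.
import Mathlib
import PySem

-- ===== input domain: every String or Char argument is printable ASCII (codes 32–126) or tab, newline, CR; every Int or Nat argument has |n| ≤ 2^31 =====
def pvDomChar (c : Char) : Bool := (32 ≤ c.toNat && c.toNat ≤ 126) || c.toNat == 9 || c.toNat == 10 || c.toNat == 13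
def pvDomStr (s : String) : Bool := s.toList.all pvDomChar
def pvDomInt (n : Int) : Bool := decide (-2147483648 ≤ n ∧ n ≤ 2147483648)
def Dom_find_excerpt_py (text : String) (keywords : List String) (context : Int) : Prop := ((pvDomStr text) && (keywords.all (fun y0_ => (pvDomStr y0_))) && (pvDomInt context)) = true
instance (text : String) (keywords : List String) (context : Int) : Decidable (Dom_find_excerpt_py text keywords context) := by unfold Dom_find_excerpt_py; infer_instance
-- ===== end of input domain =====

-- B replaces A's per-keyword find+minimum with a single left-to-right scan for the first
-- position where any keyword starts (objective: alternative algorithm, same exact result).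


-- ===== PORT A =====
def find_excerpt_py (text : String) (keywords : List String) (context : Int) : String :=
  let text_lower := PySem.Str.lower text
  let best_pos : Int := keywords.foldl (fun best_pos kw =>
      let pos := PySem.Str.find text_lower kw
      if 0 ≤ pos ∧ pos < best_pos then pos else best_pos) (PySem.Str.len text)
  if best_pos = PySem.Str.len text then
    PySem.Str.strip (PySem.Str.replace (PySem.Str.slice text none (some context)) "\n" " ")
  else
    let start := max 0 (best_pos - PySem.Int.floordiv context 2)
    let end_ := min (PySem.Str.len text) (best_pos + PySem.Int.floordiv context 2)
    let excerpt := PySem.Str.strip (PySem.Str.replace (PySem.Str.slice text (some start) (some end_)) "\n" " ")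
    let excerpt := if 0 < start then "…" ++ excerpt else excerpt
    let excerpt := if end_ < PySem.Str.len text then excerpt ++ "…" else excerpt
    excerpt

-- ===== PORT B =====
def pvClean (s : String) : String := PySem.Str.strip (PySem.Str.replace s "\n" " ")

def find_excerpt_py_alt (text : String) (keywords : List String) (context : Int) : String :=
  let text_lower := PySem.Str.lower text
  let n : Int := PySem.Str.len text
  -- text_lower.startswith(kw, i) with 0 ≤ i ≤ len(text_lower): exactly 'kw is a prefix of text_lower[i:]'
  let best : Int :=
    match (List.range n.toNat).find?
        (fun i => keywords.any (fun kw => kw.toList.isPrefixOf (text_lower.toList.drop i))) with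
    | some i => (i : Int)
    | none => n
  if best = n then
    pvClean (PySem.Str.slice text none (some context))
  else
    let half := PySem.Int.floordiv context 2
    let start := max 0 (best - half)
    let end_ := min n (best + half)
    let mid := pvClean (PySem.Str.slice text (some start) (some end_))
    (if 0 < start then "…" else "") ++ mid ++ (if end_ < n then "…" else "")

-- ===== PRECONDITION & SPEC =====
def Spec_find_excerpt_py (text : String) (keywords : List String) (context : Int) (out : String) : Prop := out = find_excerpt_py_alt text keywords context
instance (text : String) (keywords : List String) (context : Int) (out : String) : Decidable (Spec_find_excerpt_py text keywords context out) := by unfold Spec_find_excerpt_py; infer_instance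

-- ===== CLAIM (what is proved, stated in full; the proofs are below) =====
def Claim_equal_find_excerpt_py : Prop := ∀ (text : String) (keywords : List String) (context : Int), Dom_find_excerpt_py text keywords context → Spec_find_excerpt_py text keywords context (find_excerpt_py text keywords context)

-- ===== LEMMAS AND PROOFS =====

-- A's fold over the keywords: the result is bounded by the accumulator, is the accumulator or
-- one of the (nonnegative) find-results, and is a lower bound of every nonnegative find-result.
theorem pvFoldA_facts (s : List Char) (kws : List String) (acc : Int) :
    let r := kws.foldl (fun b kw =>
      let pos := PySem.Chars.find s kw.toList
      if 0 ≤ pos ∧ pos < b then pos else b) acc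
    r ≤ acc ∧ (r = acc ∨ ∃ kw ∈ kws, 0 ≤ r ∧ r = PySem.Chars.find s kw.toList) ∧
      (∀ kw ∈ kws, 0 ≤ PySem.Chars.find s kw.toList → r ≤ PySem.Chars.find s kw.toList) := by
  induction kws generalizing acc with
  | nil => simp
  | cons kw rest ih =>
    simp only [List.foldl_cons]
    by_cases h : 0 ≤ PySem.Chars.find s kw.toList ∧ PySem.Chars.find s kw.toList < acc
    · simp only [if_pos h]
      obtain ⟨h1, h2, h3⟩ := ih (PySem.Chars.find s kw.toList)
      refine ⟨le_trans h1 (le_of_lt h.2), ?_, ?_⟩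
      · rcases h2 with h2 | ⟨kw', hm, hr0, hr⟩
        · exact Or.inr ⟨kw, by simp, by rw [h2]; exact h.1, h2⟩
        · exact Or.inr ⟨kw', by simp [hm], hr0, hr⟩
      · intro kw' hm hf
        rcases List.mem_cons.mp hm with rfl | hm'
        · exact h1
        · exact h3 kw' hm' hf
    · simp only [if_neg h]
      obtain ⟨h1, h2, h3⟩ := ih acc
      refine ⟨h1, ?_, ?_⟩
      · rcases h2 with h2 | ⟨kw', hm, hr0, hr⟩
        · exact Or.inl h2
        · exact Or.inr ⟨kw', by simp [hm], hr0, hr⟩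
      · intro kw' hm hf
        rcases List.mem_cons.mp hm with rfl | hm'
        · exact le_trans h1 (le_of_not_gt fun hlt => h ⟨hf, hlt⟩)
        · exact h3 kw' hm' hf

-- the minimum of the per-keyword first occurrences IS the first position where any keyword starts
theorem pvBest_eq (s : List Char) (kws : List String) (n : Nat) (hn : n = s.length) :
    (kws.foldl (fun b kw =>
      let pos := PySem.Chars.find s kw.toList
      if 0 ≤ pos ∧ pos < b then pos else b) (n : Int)) =
    (match (List.range n).find? (fun i => kws.any (fun kw => kw.toList.isPrefixOf (s.drop i))) with
      | some i => (i : Int)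
      | none => (n : Int)) := by
  obtain ⟨h1, h2, h3⟩ := pvFoldA_facts s kws (n : Int)
  set r := kws.foldl (fun b kw =>
      let pos := PySem.Chars.find s kw.toList
      if 0 ≤ pos ∧ pos < b then pos else b) (n : Int) with hr
  set p : Nat → Bool := fun i => kws.any (fun kw => kw.toList.isPrefixOf (s.drop i)) with hp
  have hpiff : ∀ i : Nat, p i = true ↔ ∃ kw ∈ kws, kw.toList <+: s.drop i := by
    intro i
    simp [hp, List.any_eq_true, List.isPrefixOf_iff_prefix]
  have hfind_le : ∀ (kw : String), ∀ i : Nat, kw.toList <+: s.drop i →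
      0 ≤ PySem.Chars.find s kw.toList ∧ PySem.Chars.find s kw.toList ≤ (i : Int) := by
    intro kw i hpre
    have h0 : 0 ≤ PySem.Chars.find s kw.toList :=
      (PySem.Chars.find_nonneg_iff s kw.toList).mpr (hpre.isInfix.trans (List.drop_suffix i s).isInfix)
    refine ⟨h0, ?_⟩
    obtain ⟨_, hmin⟩ := PySem.Chars.find_spec h0
    by_contra hlt
    exact hmin i (by omega) hpre
  cases hfq : (List.range n).find? p with
  | none =>
    have hnone := List.find?_eq_none.mp hfq
    show r = (n : Int)
    rcases h2 with h2 | ⟨kw, hm, hr0, hrf⟩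
    · exact h2
    · have hf0 : 0 ≤ PySem.Chars.find s kw.toList := hrf ▸ hr0
      obtain ⟨hpre, _⟩ := PySem.Chars.find_spec hf0
      by_cases hlt : (PySem.Chars.find s kw.toList).toNat < n
      · exact absurd ((hpiff _).mpr ⟨kw, hm, hpre⟩)
          (by simpa using hnone _ (List.mem_range.mpr hlt))
      · have hle : PySem.Chars.find s kw.toList ≤ (n : Int) := hn ▸ PySem.Chars.find_le_length s kw.toList
        have hfn : (PySem.Chars.find s kw.toList).toNat = n := by omega
        have hkw : kw.toList = [] := by
          rw [hfn, hn, List.drop_length] at hpre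
          exact List.prefix_nil.mp hpre
        rw [hkw, PySem.Chars.find_nil] at hrf
        simp only [hkw, PySem.Chars.find_nil] at hfn
        omega
  | some j =>
    obtain ⟨hpi, i, hi, hval, hmin⟩ := List.find?_eq_some_iff_getElem.mp hfq
    simp only [List.getElem_range] at hval
    subst hval
    show r = (i : Int)
    have hin : i < n := by simpa using hi
    have hminp : ∀ k < i, p k = false := by
      intro k hk
      have := hmin k (by simpa using hk)
      simpa using this
    obtain ⟨kw, hm, hpre⟩ := (hpiff i).mp hpi
    obtain ⟨hf0, hfle⟩ := hfind_le kw i hpre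
    have hrle : r ≤ (i : Int) := le_trans (h3 kw hm hf0) hfle
    rcases h2 with h2 | ⟨kw', hm', hr0, hrf⟩
    · omega
    · have hf0' : 0 ≤ PySem.Chars.find s kw'.toList := hrf ▸ hr0
      obtain ⟨hpre', _⟩ := PySem.Chars.find_spec hf0'
      have hple : r.toNat ≤ i := by omega
      rcases lt_or_eq_of_le hple with hlt | heq
      · exfalso
        have hpt : p r.toNat = true := by
          refine (hpiff _).mpr ⟨kw', hm', ?_⟩
          have : (PySem.Chars.find s kw'.toList).toNat = r.toNat := by omega
          rwa [this] at hpre'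
        rw [hminp _ hlt] at hpt
        exact Bool.false_ne_true hpt
      · omega

-- the same, stated on the exact String-level subterms of the two ports
theorem pvBest_bridge (text : String) (keywords : List String) :
    (keywords.foldl (fun best_pos kw =>
        let pos := PySem.Str.find (PySem.Str.lower text) kw
        if 0 ≤ pos ∧ pos < best_pos then pos else best_pos) (PySem.Str.len text)) =
    (match (List.range (PySem.Str.len text).toNat).find?
        (fun i => keywords.any (fun kw => kw.toList.isPrefixOf ((PySem.Str.lower text).toList.drop i))) with
      | some i => (i : Int)
      | none => PySem.Str.len text) := by
  simp only [PySem.Str.find_eq, PySem.Str.toList_lower, PySem.Str.len_eq, Int.toNat_natCast]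
  exact pvBest_eq _ _ _ (by simp [PySem.Chars.lower])

-- ===== VERDICT (by name: the statement is the Claim_ definition above) =====
theorem find_excerpt_py_spec : Claim_equal_find_excerpt_py := by
  intro text keywords context _
  show find_excerpt_py text keywords context = find_excerpt_py_alt text keywords context
  simp only [find_excerpt_py, find_excerpt_py_alt, pvClean]
  rw [pvBest_bridge]
  set b := (match (List.range (PySem.Str.len text).toNat).find?
        (fun i => keywords.any (fun kw => kw.toList.isPrefixOf ((PySem.Str.lower text).toList.drop i))) with
      | some i => (i : Int)
      | none => PySem.Str.len text) with hb
  by_cases hbn : b = PySem.Str.len text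
  · simp [hbn]
  · simp only [if_neg hbn]
    split_ifs <;> simp [String.append_assoc, String.empty_append, String.append_empty]
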